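-- pv_equiv track=rewrite | github.com/Franco414/DASO_C14 | Ejercicios_Extras/Unidad6/Ejercicio_6_3.py | my_function_string_a
-- ===== SOURCE A (Python) =====
-- def my_function_string_a(caracter,cadena,maxRe):
--     lista=[]
--     countRemp=0
--     for i in range(0,len(cadena)):
--         lista.append(cadena[i])
--         if (countRemp<maxRe):
--             lista.append(caracter)
--             countRemp=countRemp+1
--     ret="".join(lista)
--     return ret
-- ===== SOURCE B (Python) =====
-- def my_function_string_a(caracter, cadena, maxRe):
--     m = max(0, min(maxRe, len(cadena)))
--     return "".join(c + caracter for c in cadena[:m]) + cadena[m:]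
-- ===== Notes on version B (the rewrite author's own statement) =====
-- stated objective: simpler
-- what changed: Replaces the indexed loop with a running counter and per-character branch by computing the clamped insertion count m up front and building the result as an interleaved prefix join plus the untouched suffix slice.
import Mathlib
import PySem

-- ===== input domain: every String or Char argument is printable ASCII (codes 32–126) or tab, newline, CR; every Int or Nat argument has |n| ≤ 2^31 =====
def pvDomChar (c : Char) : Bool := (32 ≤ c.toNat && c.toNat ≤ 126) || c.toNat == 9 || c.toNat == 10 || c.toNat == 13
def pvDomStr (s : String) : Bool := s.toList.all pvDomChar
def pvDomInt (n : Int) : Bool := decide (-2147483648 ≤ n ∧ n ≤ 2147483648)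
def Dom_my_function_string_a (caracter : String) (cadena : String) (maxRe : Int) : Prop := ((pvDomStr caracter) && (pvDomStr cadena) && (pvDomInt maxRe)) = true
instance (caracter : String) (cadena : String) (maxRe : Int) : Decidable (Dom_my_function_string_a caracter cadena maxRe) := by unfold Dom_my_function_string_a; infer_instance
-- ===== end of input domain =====

-- B replaces the counting loop with a clamped count m computed up front, then an
-- interleaved prefix join plus the untouched suffix slice (simpler decomposition, same cost).

-- ===== PORT A =====
-- loop body: lista.append(cadena[i]); if countRemp < maxRe: lista.append(caracter); countRemp += 1
def pvAStep (caracter : String) (maxRe : Int) (acc : List String × Int) (c : Char) : List String × Int :=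
  let lista := acc.1 ++ [String.singleton c]
  if acc.2 < maxRe then (lista ++ [caracter], acc.2 + 1) else (lista, acc.2)

def my_function_string_a (caracter : String) (cadena : String) (maxRe : Int) : String :=
  -- for i in range(0, len(cadena)): … cadena[i] …  (index always in range, so getD is exact)
  let st := (PySem.List.pyRange 0 (PySem.List.len cadena.toList)).foldl
    (fun acc i => pvAStep caracter maxRe acc (PySem.List.pyGetD cadena.toList i ' ')) ([], 0)
  PySem.Str.join "" st.1

-- ===== PORT B =====
def my_function_string_a_alt (caracter : String) (cadena : String) (maxRe : Int) : String :=
  let m : Int := max 0 (min maxRe (PySem.Str.len cadena))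
  let s := cadena.toList
  String.ofList (PySem.Chars.join []
      ((PySem.List.slice s none (some m)).map (fun c => c :: caracter.toList))
    ++ PySem.List.slice s (some m))

-- ===== PRECONDITION & SPEC =====
def Spec_my_function_string_a (caracter : String) (cadena : String) (maxRe : Int) (out : String) : Prop := out = my_function_string_a_alt caracter cadena maxRe
instance (caracter : String) (cadena : String) (maxRe : Int) (out : String) : Decidable (Spec_my_function_string_a caracter cadena maxRe out) := by unfold Spec_my_function_string_a; infer_instance

-- ===== CLAIM (what is proved, stated in full; the proofs are below) =====
def Claim_equal_my_function_string_a : Prop := ∀ (caracter : String) (cadena : String) (maxRe : Int), Dom_my_function_string_a caracter cadena maxRe → Spec_my_function_string_a caracter cadena maxRe (my_function_string_a caracter cadena maxRe)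

-- ===== LEMMAS AND PROOFS =====

-- join with empty separator is flatten
theorem pv_join_nil_eq_flatten (ls : List (List Char)) :
    PySem.Chars.join [] ls = ls.flatten := by
  induction ls with
  | nil => simp [PySem.Chars.join_nil]
  | cons a rest ih =>
    cases rest with
    | nil => simp [PySem.Chars.join_singleton]
    | cons b r => simp [PySem.Chars.join_cons_cons, ih]

-- the A-loop invariant: the fold interleaves caracter after the first K remaining chars
theorem pv_fold_aStep (caracter : String) (maxRe : Int) (xs : List Char)
    (pre : List String) (cnt : Int) :
    (xs.foldl (pvAStep caracter maxRe) (pre, cnt)).1 =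
      pre ++ (xs.take (min (maxRe - cnt) (xs.length : Int)).toNat).flatMap
               (fun c => [String.singleton c, caracter])
          ++ (xs.drop (min (maxRe - cnt) (xs.length : Int)).toNat).map String.singleton := by
  induction xs generalizing pre cnt with
  | nil => simp
  | cons c xs ih =>
    by_cases h : cnt < maxRe
    · have hk : (min (maxRe - cnt) ((c :: xs).length : Int)).toNat
          = (min (maxRe - (cnt + 1)) ((xs.length : Int))).toNat + 1 := by
        simp only [List.length_cons]
        push_cast
        omega
      rw [hk]
      simp only [List.foldl_cons, pvAStep, if_pos h, List.take_succ_cons, List.drop_succ_cons]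
      rw [ih]
      simp
    · have hk : (min (maxRe - cnt) ((c :: xs).length : Int)).toNat = 0 := by
        simp only [List.length_cons]; push_cast; omega
      have hk' : (min (maxRe - cnt) ((xs.length : Int))).toNat = 0 := by omega
      rw [hk]
      simp only [List.foldl_cons, pvAStep, if_neg h, List.take_zero, List.drop_zero]
      rw [ih]
      simp [hk']

theorem pv_flatten_flatMap (caracter : String) (l : List Char) :
    (List.map String.toList
      (l.flatMap (fun c => [String.singleton c, caracter]))).flatten
    = (l.map (fun c => c :: caracter.toList)).flatten := by
  induction l with
  | nil => simp
  | cons c l ih => simp [ih]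

theorem pv_flatten_map_singleton (l : List Char) :
    (List.map String.toList (l.map String.singleton)).flatten = l := by
  induction l with
  | nil => simp
  | cons c l ih =>
    simp only [List.map_cons, List.flatten_cons, ih]
    simp

-- ===== VERDICT (by name: the statement is the Claim_ definition above) =====
theorem my_function_string_a_spec : Claim_equal_my_function_string_a := by
  intro caracter cadena maxRe _
  unfold Spec_my_function_string_a my_function_string_a my_function_string_a_alt
  set xs := cadena.toList with hxs
  apply String.ext
  rw [PySem.Str.toList_join]
  rw [PySem.List.foldl_pyRange_zero_pyGetD]
  rw [pv_fold_aStep]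
  dsimp only
  have hm0 : (0 : Int) ≤ max 0 (min maxRe (PySem.Str.len cadena)) := le_max_left _ _
  have hK : (min (maxRe - 0) (xs.length : Int)).toNat
      = (max 0 (min maxRe (PySem.Str.len cadena))).toNat := by
    have : PySem.Str.len cadena = (xs.length : Int) := by
      simp [hxs]
    rw [this]; omega
  rw [PySem.List.slice_to _ hm0, PySem.List.slice_from _ hm0]
  simp only [String.toList_empty, List.nil_append, List.map_append, pv_join_nil_eq_flatten, List.flatten_append,
    pv_flatten_flatMap, pv_flatten_map_singleton, String.toList_ofList, hK]
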